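-- pv_equiv track=rewrite | github.com/shenwalter/travelingMailman | not_great_ai.py | cyclic_permutations
-- ===== SOURCE A (Python) =====
-- def combiner(first: list, after: list) -> list:
--     if len(after) == 0:
--         return first
--     out = []
--     for i in range(0, len(after)):
--         out.append(first+[after[i]])
--     return out
--
-- def missing(total: list, already: list) -> list:
--     missed = []
--     for element in total:
--         if total.count(element) > already.count(element) + missed.count(element):
--             missed.append(element)
--     return missed
--
-- def cyclic_permutations(array: list) -> list:
--     out_perms = [[array[0]]]
--     for i in range(0, len(array)-1):
--         j_len = len(out_perms)
--         for j in range(0, j_len):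
--             combined = combiner(out_perms[0], missing(array, out_perms[0]))
--             for k in range(0, len(combined)):
--                 out_perms.append(combined[k])
--             out_perms.pop(0)
--     return out_perms
-- ===== SOURCE B (Python) =====
-- def cyclic_permutations(array: list) -> list:
--     first = array[0]
--
--     def rec(prefix: list, remaining: list) -> list:
--         if not remaining:
--             return [prefix]
--         out = []
--         for i in range(len(array)):
--             x = array[i]
--             if array[:i].count(x) < remaining.count(x):
--                 rest = remaining[:]
--                 rest.remove(x)
--                 out += rec(prefix + [x], rest)
--         return out
--
--     return rec([first], array[1:])
-- ===== Notes on version B (the rewrite author's own statement) =====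
-- stated objective: faster
-- what changed: Replaces the BFS queue with pop(0) and the count-based missing/combiner level expansion by a direct recursive DFS that fixes the first element and extends the prefix by each still-needed occurrence of array (selected by a prefix-count test), producing the identical list including duplicate multiplicity and order.
import Mathlib
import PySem

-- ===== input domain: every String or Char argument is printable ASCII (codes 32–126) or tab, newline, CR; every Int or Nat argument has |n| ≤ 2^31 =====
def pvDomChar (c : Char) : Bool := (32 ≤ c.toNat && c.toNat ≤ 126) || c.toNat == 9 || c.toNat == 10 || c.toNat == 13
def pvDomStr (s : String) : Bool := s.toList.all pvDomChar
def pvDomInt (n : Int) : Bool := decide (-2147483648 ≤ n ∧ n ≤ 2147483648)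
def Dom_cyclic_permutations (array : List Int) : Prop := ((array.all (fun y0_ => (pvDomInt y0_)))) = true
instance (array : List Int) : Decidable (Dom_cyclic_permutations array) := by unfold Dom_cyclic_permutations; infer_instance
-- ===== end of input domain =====

-- B replaces A's BFS queue (pop(0)) and missing/combiner machinery by a recursive DFS that
-- extends the fixed-first-element prefix by each still-needed occurrence of array; same output.

-- ===== PORT A =====
-- combiner: when `after` is empty Python returns the flat list `first` (not a list of lists);
-- that branch is unreachable from cyclic_permutations (missing is never empty there) and is
-- ported as [first] to keep the declared type.
def combiner (first : List Int) (after : List Int) : List (List Int) :=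
  if PySem.List.len after = 0 then [first]
  else
    (PySem.List.pyRange 0 (PySem.List.len after)).foldl
      (fun out i => out ++ [first ++ [PySem.List.pyGetD after i 0]]) []

def missing (total : List Int) (already : List Int) : List Int :=
  total.foldl
    (fun missed element =>
      if PySem.List.count total element > PySem.List.count already element + PySem.List.count missed element
      then missed ++ [element] else missed) []

-- body of A's j-loop: combined from out_perms[0], append its elements, pop(0)
def innerBody (array : List Int) (q : List (List Int)) : List (List Int) :=
  let head := PySem.List.pyGetD q 0 []
  let combined := combiner head (missing array head)
  let q' := (PySem.List.pyRange 0 (PySem.List.len combined)).foldl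
      (fun acc k => acc ++ [PySem.List.pyGetD combined k []]) q
  match PySem.List.pop? q' 0 with
  | some (_, rest) => rest
  | none => q'      -- unreachable: q' is nonempty whenever q is

def cyclic_permutations (array : List Int) : List (List Int) :=
  (PySem.List.pyRange 0 (PySem.List.len array - 1)).foldl
    (fun q _i =>
      (PySem.List.pyRange 0 (PySem.List.len q)).foldl (fun q' _j => innerBody array q') q)
    [[PySem.List.pyGetD array 0 0]]

-- ===== PORT B =====
mutual
-- rec(prefix, remaining) of Source B
def cpRec (array : List Int) (pfx : List Int) (remaining : List Int) : List (List Int) :=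
  if remaining = [] then [pfx]
  else cpLoop array pfx remaining (PySem.List.pyRange 0 (PySem.List.len array)) []
termination_by (remaining.length, 1, 0)

-- the 'for i in range(len(array))' loop of rec, with accumulator out
def cpLoop (array : List Int) (pfx : List Int) (remaining : List Int)
    (idxs : List Int) (out : List (List Int)) : List (List Int) :=
  match idxs with
  | [] => out
  | i :: rest =>
    let x := PySem.List.pyGetD array i 0
    if PySem.List.count (PySem.List.slice array none (some i)) x < PySem.List.count remaining x then
      cpLoop array pfx remaining rest
        (out ++ cpRec array (pfx ++ [x]) ((PySem.List.remove? remaining x).getD remaining))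
    else cpLoop array pfx remaining rest out
termination_by (remaining.length, 0, idxs.length)
decreasing_by
  · rename_i h
    have h' : PySem.List.count (PySem.List.slice array none (some i)) (PySem.List.pyGetD array i 0)
        < PySem.List.count remaining (PySem.List.pyGetD array i 0) := h
    have hc := PySem.List.count_eq remaining (PySem.List.pyGetD array i 0)
    have hmem : PySem.List.pyGetD array i 0 ∈ remaining := by
      apply List.count_pos_iff.mp; omega
    rw [PySem.List.remove?_eq_some_erase remaining _ hmem]
    have hlt : ((remaining.erase (PySem.List.pyGetD array i 0)).length) < remaining.length := by
      rw [List.length_erase_of_mem hmem]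
      have := List.length_pos_of_mem hmem
      omega
    exact Prod.Lex.left _ _ hlt
  · exact Prod.Lex.right _ (Prod.Lex.right _ (Nat.lt_succ_self _))
  · exact Prod.Lex.right _ (Prod.Lex.right _ (Nat.lt_succ_self _))
end

def cyclic_permutations_alt (array : List Int) : List (List Int) :=
  cpRec array [PySem.List.pyGetD array 0 0] (PySem.List.slice array (some 1) none)

-- ===== PRECONDITION & SPEC =====
-- Pre_ excludes only the empty list, on which Python A raises IndexError (array[0]).
def Pre_cyclic_permutations (array : List Int) : Prop := array ≠ []
instance (array : List Int) : Decidable (Pre_cyclic_permutations array) := by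
  unfold Pre_cyclic_permutations; infer_instance
def pvWitness_cyclic_permutations : List Int := ([1, 2])

def Spec_cyclic_permutations (array : List Int) (out : List (List Int)) : Prop := out = cyclic_permutations_alt array
instance (array : List Int) (out : List (List Int)) : Decidable (Spec_cyclic_permutations array out) := by unfold Spec_cyclic_permutations; infer_instance

-- ===== CLAIM (what is proved, stated in full; the proofs are below) =====
def Claim_equal_cyclic_permutations : Prop := ∀ (array : List Int), Dom_cyclic_permutations array → Pre_cyclic_permutations array → Spec_cyclic_permutations array (cyclic_permutations array)

-- ===== LEMMAS AND PROOFS =====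

-- the common selection scan: pick x at each position whose prefix-count is below its count in rem
def sel (rem seen rest : List Int) : List Int :=
  match rest with
  | [] => []
  | x :: rs =>
    if List.count x seen < List.count x rem
    then x :: sel rem (seen ++ [x]) rs
    else sel rem (seen ++ [x]) rs

def stepA (array p : List Int) : List (List Int) := combiner p (missing array p)

def Lq (array : List Int) (q : List (List Int)) : List (List Int) := q.flatMap (stepA array)

lemma foldl_ignore {α : Type} (g : α → α) (l : List Int) (init : α) :
    l.foldl (fun a _ => g a) init = g^[l.length] init := by
  induction l generalizing init with
  | nil => rfl
  | cons x xs ih => simp [List.foldl_cons, ih, Function.iterate_succ_apply]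

lemma combiner_eq_map (first after : List Int) (h : after ≠ []) :
    combiner first after = after.map (fun a => first ++ [a]) := by
  unfold combiner
  rw [if_neg (by simp [PySem.List.len_eq, h])]
  rw [PySem.List.foldl_pyRange_zero_pyGetD after 0 (fun out x => out ++ [first ++ [x]]) []]
  simpa using PySem.List.foldl_append_singleton_eq_map (fun a => first ++ [a]) after []

lemma innerBody_cons (array x : List Int) (rest : List (List Int)) :
    innerBody array (x :: rest) = rest ++ stepA array x := by
  unfold innerBody
  simp only [PySem.List.pyGetD_zero_cons]
  rw [PySem.List.foldl_pyRange_zero_pyGetD (combiner x (missing array x)) []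
        (fun acc y => acc ++ [y]) (x :: rest),
      PySem.List.foldl_append_singleton]
  simp [PySem.List.pop?_zero_cons, stepA]

lemma qrot (array : List Int) :
    ∀ (todo done : List (List Int)),
      (innerBody array)^[todo.length] (todo ++ done) = done ++ Lq array todo := by
  intro todo
  induction todo with
  | nil => intro done; simp [Lq]
  | cons x todo ih =>
    intro done
    rw [List.length_cons, Function.iterate_succ_apply, List.cons_append,
        innerBody_cons, List.append_assoc, ih]
    simp [Lq]

lemma iter_append (array : List Int) (k : ℕ) :
    ∀ q1 q2, (Lq array)^[k] (q1 ++ q2) = (Lq array)^[k] q1 ++ (Lq array)^[k] q2 := by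
  induction k with
  | zero => intro q1 q2; simp
  | succ k ih =>
    intro q1 q2
    rw [Function.iterate_succ_apply, Function.iterate_succ_apply, Function.iterate_succ_apply]
    rw [show Lq array (q1 ++ q2) = Lq array q1 ++ Lq array q2 from List.flatMap_append]
    exact ih _ _

lemma iter_flatMap (array : List Int) (k : ℕ) :
    ∀ q, (Lq array)^[k] q = q.flatMap (fun p => (Lq array)^[k] [p]) := by
  have hnil : (Lq array)^[k] [] = [] := by
    induction k with
    | zero => rfl
    | succ k ih => rw [Function.iterate_succ_apply]; exact ih
  intro q
  induction q with
  | nil => simpa using hnil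
  | cons x q ih =>
    rw [show (x :: q) = [x] ++ q from rfl, iter_append, ih, List.flatMap_append]
    simp

lemma missing_aux (array p rem : List Int)
    (hinv : ∀ x, List.count x rem + List.count x p = List.count x array) :
    ∀ (rest seen missed : List Int), seen ++ rest = array →
      (∀ x, List.count x missed = min (List.count x seen) (List.count x rem)) →
      List.foldl
        (fun missed element =>
          if PySem.List.count array element >
              PySem.List.count p element + PySem.List.count missed element
          then missed ++ [element] else missed) missed rest
        = missed ++ sel rem seen rest := by
  intro rest
  induction rest with
  | nil => intro seen missed _ _; simp [sel]
  | cons x rs ih =>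
    intro seen missed hsplit hm
    have hinvx := hinv x
    have hmx := hm x
    have hsplit' : (seen ++ [x]) ++ rs = array := by simpa [List.append_assoc] using hsplit
    rw [List.foldl_cons]
    by_cases hc : List.count x seen < List.count x rem
    · have hcond : PySem.List.count array x > PySem.List.count p x + PySem.List.count missed x := by
        simp only [PySem.List.count_eq]; omega
      rw [if_pos hcond]
      have hm' : ∀ y, List.count y (missed ++ [x]) =
          min (List.count y (seen ++ [x])) (List.count y rem) := by
        intro y
        have hmy := hm y
        rcases eq_or_ne x y with rfl | hne
        · simp only [List.count_append, List.count_cons, List.count_nil, beq_self_eq_true,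
            if_true]
          omega
        · simp only [List.count_append, List.count_cons, List.count_nil]
          rw [if_neg (by simp [hne])]
          omega
      rw [ih (seen ++ [x]) (missed ++ [x]) hsplit' hm']
      simp [sel, hc]
    · have hcond : ¬ (PySem.List.count array x > PySem.List.count p x + PySem.List.count missed x) := by
        simp only [PySem.List.count_eq]; omega
      rw [if_neg hcond]
      have hm' : ∀ y, List.count y missed =
          min (List.count y (seen ++ [x])) (List.count y rem) := by
        intro y
        have hmy := hm y
        rcases eq_or_ne x y with rfl | hne
        · simp only [List.count_append, List.count_cons, List.count_nil, beq_self_eq_true,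
            if_true]
          omega
        · simp only [List.count_append, List.count_cons, List.count_nil]
          rw [if_neg (by simp [hne])]
          omega
      rw [ih (seen ++ [x]) missed hsplit' hm']
      simp [sel, hc]

lemma missing_eq_sel (array p rem : List Int)
    (hinv : ∀ x, List.count x rem + List.count x p = List.count x array) :
    missing array p = sel rem [] array := by
  unfold missing
  simpa using missing_aux array p rem hinv array [] [] (by simp) (by simp)

lemma sel_eq_nil_iff (rem : List Int) :
    ∀ (rest seen : List Int),
      (sel rem seen rest = [] ↔ ∀ x ∈ rest, List.count x rem ≤ List.count x seen) := by
  intro rest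
  induction rest with
  | nil => intro seen; simp [sel]
  | cons x rs ih =>
    intro seen
    by_cases hc : List.count x seen < List.count x rem
    · simp only [sel, if_pos hc]
      constructor
      · intro habs; exact absurd habs (by simp)
      · intro hall
        exact absurd (hall x (by simp)) (by omega)
    · simp only [sel, if_neg hc]
      rw [ih (seen ++ [x])]
      constructor
      · intro hall y hy
        rcases List.mem_cons.mp hy with rfl | hy
        · omega
        · have := hall y hy
          rcases eq_or_ne x y with rfl | hne
          · simp only [List.count_append, List.count_cons, List.count_nil, beq_self_eq_true,
              if_true] at this
            omega
          · simp only [List.count_append, List.count_cons, List.count_nil] at this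
            rw [if_neg (by simp [hne])] at this
            omega
      · intro hall y hy
        have := hall y (by simp [hy])
        rcases eq_or_ne x y with rfl | hne
        · simp only [List.count_append, List.count_cons, List.count_nil, beq_self_eq_true,
            if_true]
          omega
        · simp only [List.count_append, List.count_cons, List.count_nil]
          rw [if_neg (by simp [hne])]
          omega

lemma mem_sel_pos (rem : List Int) :
    ∀ (rest seen : List Int) (x : Int), x ∈ sel rem seen rest → 0 < List.count x rem := by
  intro rest
  induction rest with
  | nil => intro seen x hx; simp [sel] at hx
  | cons z rs ih =>
    intro seen x hx
    by_cases hc : List.count z seen < List.count z rem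
    · simp only [sel, if_pos hc] at hx
      rcases List.mem_cons.mp hx with rfl | hx
      · omega
      · exact ih (seen ++ [z]) x hx
    · simp only [sel, if_neg hc] at hx
      exact ih (seen ++ [z]) x hx

lemma bloop (array p rem : List Int) :
    ∀ (fuel : ℕ) (k : ℕ) (out : List (List Int)), array.length - k ≤ fuel → k ≤ array.length →
      cpLoop array p rem (PySem.List.pyRange (k : ℤ) (PySem.List.len array)) out
        = out ++ (sel rem (array.take k) (array.drop k)).flatMap
            (fun x => cpRec array (p ++ [x]) (rem.erase x)) := by
  intro fuel
  induction fuel with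
  | zero =>
    intro k out hfuel hk
    have hkl : k = array.length := by omega
    subst hkl
    rw [PySem.List.len_eq, PySem.List.pyRange_one_eq_nil (le_refl _), List.drop_length]
    simp [cpLoop, sel]
  | succ fuel ih =>
    intro k out hfuel hk
    rcases eq_or_lt_of_le hk with hkl | hkl
    · subst hkl
      rw [PySem.List.len_eq, PySem.List.pyRange_one_eq_nil (le_refl _), List.drop_length]
      simp [cpLoop, sel]
    · have hklt : (k : ℤ) < PySem.List.len array := by
        rw [PySem.List.len_eq]; exact_mod_cast hkl
      rw [PySem.List.pyRange_one_cons hklt, cpLoop]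
      have hx : PySem.List.pyGetD array (k : ℤ) 0 = array[k] := by
        rw [PySem.List.pyGetD_natCast]; exact List.getD_eq_getElem array 0 hkl
      have hslice : PySem.List.slice array none (some (k : ℤ)) = array.take k :=
        PySem.List.slice_to_natCast array k
      have hdrop : array.drop k = array[k] :: array.drop (k + 1) := List.drop_eq_getElem_cons hkl
      have htake : array.take (k + 1) = array.take k ++ [array[k]] := by
        rw [List.take_add_one]; simp [List.getElem?_eq_getElem hkl]
      have hcast : ((k : ℤ) + 1) = ((k + 1 : ℕ) : ℤ) := by push_cast; ring
      simp only [hx, hslice, PySem.List.count_eq]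
      by_cases hc : List.count array[k] (array.take k) < List.count array[k] rem
      · rw [if_pos hc]
        have hmem : array[k] ∈ rem := List.count_pos_iff.mp (by omega)
        rw [PySem.List.remove?_eq_some_erase rem _ hmem, Option.getD_some]
        rw [hcast, ih (k + 1) _ (by omega) (by omega)]
        rw [hdrop]
        simp only [sel, if_pos hc, ← htake, List.flatMap_cons, List.append_assoc]
      · rw [if_neg hc]
        rw [hcast, ih (k + 1) _ (by omega) (by omega)]
        rw [hdrop]
        simp only [sel, if_neg hc, ← htake]

lemma cpRec_ne_nil_eq (array p rem : List Int) (h : rem ≠ []) :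
    cpRec array p rem
      = (sel rem [] array).flatMap (fun x => cpRec array (p ++ [x]) (rem.erase x)) := by
  rw [cpRec, if_neg h]
  have h0 : ((0 : ℕ) : ℤ) = (0 : ℤ) := rfl
  have := bloop array p rem array.length 0 [] (by omega) (by omega)
  rw [h0] at this
  simpa using this

lemma main_iter (array : List Int) :
    ∀ (k : ℕ) (p rem : List Int),
      (∀ x, List.count x rem + List.count x p = List.count x array) →
      rem.length = k →
      (Lq array)^[k] [p] = cpRec array p rem := by
  intro k
  induction k with
  | zero =>
    intro p rem hinv hlen
    have : rem = [] := List.length_eq_zero_iff.mp hlen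
    subst this
    rw [cpRec, if_pos rfl]
    rfl
  | succ k ih =>
    intro p rem hinv hlen
    have hne : rem ≠ [] := by intro h; subst h; simp at hlen
    have hM := missing_eq_sel array p rem hinv
    have hMne : sel rem [] array ≠ [] := by
      obtain ⟨z, rem', rfl⟩ := List.exists_cons_of_ne_nil hne
      intro hnil
      have hz : List.count z (z :: rem') > 0 := by simp
      have hzarr : z ∈ array := by
        apply List.count_pos_iff.mp
        have := hinv z
        omega
      have := (sel_eq_nil_iff (z :: rem') array []).mp hnil z hzarr
      simp at this
    rw [Function.iterate_succ_apply]
    have hLp : Lq array [p] = stepA array p := by simp [Lq]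
    rw [hLp, stepA, hM, combiner_eq_map p _ hMne]
    rw [iter_flatMap, List.flatMap_map]
    rw [cpRec_ne_nil_eq array p rem hne]
    apply List.flatMap_congr
    intro x hxsel
    have hpos := mem_sel_pos rem array [] x hxsel
    have hmem : x ∈ rem := List.count_pos_iff.mp hpos
    apply ih
    · intro y
      have := hinv y
      rcases eq_or_ne x y with rfl | hne'
      · rw [List.count_erase]
        simp only [List.count_append, List.count_cons, List.count_nil, beq_self_eq_true, if_true]
        omega
      · rw [List.count_erase]
        rw [if_neg (by simp [hne'])]
        simp only [List.count_append, List.count_cons, List.count_nil]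
        rw [if_neg (by simp [hne'])]
        omega
    · rw [List.length_erase_of_mem hmem]
      omega

lemma cyclic_eq_iter (array : List Int) :
    cyclic_permutations array
      = (Lq array)^[(PySem.List.len array - 1).toNat] [[PySem.List.pyGetD array 0 0]] := by
  unfold cyclic_permutations
  rw [foldl_ignore (fun q => (PySem.List.pyRange 0 (PySem.List.len q)).foldl
    (fun q' _ => innerBody array q') q)]
  have hfun : (fun q => (PySem.List.pyRange 0 (PySem.List.len q)).foldl
      (fun q' _ => innerBody array q') q) = Lq array := by
    funext q
    rw [foldl_ignore (innerBody array), PySem.List.len_eq, PySem.List.length_pyRange_one,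
        show (((q.length : ℤ)) - 0).toNat = q.length by omega]
    simpa using qrot array q []
  rw [hfun, PySem.List.length_pyRange_one]
  norm_num


-- ===== VERDICT (by name: the statement is the Claim_ definition above) =====
theorem cyclic_permutations_spec : Claim_equal_cyclic_permutations := by
  intro array _hdom hpre
  obtain ⟨a, t, rfl⟩ := List.exists_cons_of_ne_nil hpre
  unfold Spec_cyclic_permutations cyclic_permutations_alt
  rw [cyclic_eq_iter, PySem.List.pyGetD_zero_cons, PySem.List.slice_from_one, List.tail_cons]
  have hlen : (PySem.List.len (a :: t) - 1).toNat = t.length := by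
    simp [PySem.List.len_eq]
  rw [hlen]
  apply main_iter (a :: t) t.length [a] t _ rfl
  intro x
  simp [List.count_cons]
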